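-- pv_equiv track=rewrite | github.com/sashuu69/dsa-python | smart-interviews-questions/2-number-distribution/main.py | counter
-- ===== SOURCE A (Python) =====
-- def counter(arr):
--     zero_n = posi_n = nega_n = 0
--
--     for i in arr:
--         if i > 0:
--             posi_n += 1
--         elif i < 0:
--             nega_n += 1
--         else:
--             zero_n += 1
--
--     return zero_n, posi_n, nega_n
-- ===== SOURCE B (Python) =====
-- def counter(arr):
--     posi = sum(1 for i in arr if i > 0)
--     nega = sum(1 for i in arr if i < 0)
--     zero = len(arr) - posi - nega
--     return zero, posi, nega
-- ===== Notes on version B (the rewrite author's own statement) =====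
-- stated objective: idiomatic
-- what changed: Replaces the fused branch-driven accumulator loop with independent counting passes (sum of generator for positives and negatives) plus len-subtraction for zeros.
import Mathlib
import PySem

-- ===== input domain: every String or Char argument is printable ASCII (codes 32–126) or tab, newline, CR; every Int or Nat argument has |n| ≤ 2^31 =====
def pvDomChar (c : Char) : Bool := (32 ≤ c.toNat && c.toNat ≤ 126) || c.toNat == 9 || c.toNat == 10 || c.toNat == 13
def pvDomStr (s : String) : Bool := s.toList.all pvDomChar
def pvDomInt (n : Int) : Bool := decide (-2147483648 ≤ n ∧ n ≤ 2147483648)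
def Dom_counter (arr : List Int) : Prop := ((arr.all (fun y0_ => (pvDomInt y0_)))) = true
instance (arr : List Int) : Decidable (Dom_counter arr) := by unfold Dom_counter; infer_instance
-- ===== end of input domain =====

-- B replaces A's single fused branching loop by independent counting passes plus len-subtraction for zeros (same O(n) cost, different decomposition).

-- ===== PORT A =====
-- one fused loop over arr with three accumulators, branches in A's order
def counter (arr : List Int) : Int × Int × Int :=
  arr.foldl
    (fun (st : Int × Int × Int) i =>
      if i > 0 then (st.1, st.2.1 + 1, st.2.2)
      else if i < 0 then (st.1, st.2.1, st.2.2 + 1)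
      else (st.1 + 1, st.2.1, st.2.2))
    (0, 0, 0)

-- ===== PORT B =====
def counter_alt (arr : List Int) : Int × Int × Int :=
  let posi : Int := ((arr.filter (fun i => i > 0)).length : Int)
  let nega : Int := ((arr.filter (fun i => i < 0)).length : Int)
  let zero : Int := (arr.length : Int) - posi - nega
  (zero, posi, nega)

-- ===== PRECONDITION & SPEC =====
def Spec_counter (arr : List Int) (out : Int × Int × Int) : Prop := out = counter_alt arr
instance (arr : List Int) (out : Int × Int × Int) : Decidable (Spec_counter arr out) := by unfold Spec_counter; infer_instance

-- ===== CLAIM (what is proved, stated in full; the proofs are below) =====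
def Claim_equal_counter : Prop := ∀ (arr : List Int), Dom_counter arr → Spec_counter arr (counter arr)

-- ===== LEMMAS AND PROOFS =====

lemma counter_fold (arr : List Int) (z p n : Int) :
    arr.foldl
      (fun (st : Int × Int × Int) i =>
        if i > 0 then (st.1, st.2.1 + 1, st.2.2)
        else if i < 0 then (st.1, st.2.1, st.2.2 + 1)
        else (st.1 + 1, st.2.1, st.2.2))
      (z, p, n)
    = (z + ((arr.length : Int) - ((arr.filter (fun i => i > 0)).length : Int)
            - ((arr.filter (fun i => i < 0)).length : Int)),
       p + ((arr.filter (fun i => i > 0)).length : Int),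
       n + ((arr.filter (fun i => i < 0)).length : Int)) := by
  induction arr generalizing z p n with
  | nil => simp
  | cons a t ih =>
    by_cases h1 : a > 0
    · rw [List.foldl_cons, if_pos h1, ih]
      refine Prod.ext ?_ (Prod.ext ?_ ?_) <;>
        simp [List.filter_cons, h1, not_lt.mpr (le_of_lt h1)] <;> push_cast <;> omega
    · by_cases h2 : a < 0
      · rw [List.foldl_cons, if_neg h1, if_pos h2, ih]
        refine Prod.ext ?_ (Prod.ext ?_ ?_) <;>
          simp [List.filter_cons, h1, h2] <;> push_cast <;> omega
      · rw [List.foldl_cons, if_neg h1, if_neg h2, ih]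
        refine Prod.ext ?_ (Prod.ext ?_ ?_) <;>
          simp [List.filter_cons, h1, h2] <;> push_cast <;> omega

-- ===== VERDICT (by name: the statement is the Claim_ definition above) =====
theorem counter_spec : Claim_equal_counter := by
  intro arr _
  unfold Spec_counter counter counter_alt
  rw [counter_fold]
  refine Prod.ext ?_ (Prod.ext ?_ ?_) <;> simp <;> omega
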